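-- pv_equiv track=rewrite | github.com/H0r4c3/Challenges | py.checkio.org/ghosts_age.py | list_opacity
-- ===== SOURCE A (Python) =====
-- import math
-- import math
--
-- def isPerfectSquare(x):
--     root = int(math.sqrt(x))
--     return root * root == x
--
-- def isFibo(n):
--     '''
--     A number n is Fibonacci if and only if one or both of (5*n*n + 4) or (5*n*n - 4) is a perfect square
--     '''
--     return isPerfectSquare(5*n*n + 4) or isPerfectSquare(5*n*n - 4)
--
-- def list_opacity(n):
--     '''
--     Calculates the list of opacities
--     '''
--     list_opacities = list()
--     list_opacities.append(10000)
--
--     for age in range(1, n):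
--         if isFibo(age):
--             list_opacities.append(list_opacities[age-1] - age)
--         else:
--             list_opacities.append(list_opacities[age-1] + 1)
--
--     return list_opacities
-- ===== SOURCE B (Python) =====
-- def list_opacity(n):
--     '''
--     Calculates the list of opacities (Fibonacci set precomputed, running value kept).
--     '''
--     fibs = set()
--     a, b = 1, 2
--     while a < n:
--         fibs.add(a)
--         a, b = b, a + b
--     out = [10000]
--     cur = 10000
--     for age in range(1, n):
--         cur = cur - age if age in fibs else cur + 1
--         out.append(cur)
--     return out
-- ===== Notes on version B (the rewrite author's own statement) =====
-- stated objective: faster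
-- what changed: Replaces the per-age closed-form perfect-square Fibonacci test (two math.sqrt calls per element) and the list self-indexing by a Fibonacci set generated once by iteration plus a running accumulator value.
import Mathlib
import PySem

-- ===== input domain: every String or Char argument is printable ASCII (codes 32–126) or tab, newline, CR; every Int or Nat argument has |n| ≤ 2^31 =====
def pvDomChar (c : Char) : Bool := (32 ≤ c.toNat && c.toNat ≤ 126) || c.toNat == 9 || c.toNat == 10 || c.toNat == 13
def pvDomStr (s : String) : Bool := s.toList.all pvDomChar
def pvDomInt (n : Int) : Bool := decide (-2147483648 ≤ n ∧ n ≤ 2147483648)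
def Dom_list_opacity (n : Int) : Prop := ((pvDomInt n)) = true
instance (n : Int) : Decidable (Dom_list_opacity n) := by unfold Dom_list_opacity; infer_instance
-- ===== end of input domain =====

-- B replaces A's per-age closed-form perfect-square Fibonacci test and list self-indexing by a
-- Fibonacci set generated once by iteration plus a running accumulator (objective: faster, constant factor).

-- ===== PORT A =====
-- int(math.sqrt(x)) is ported as the integer square root: on the magnitudes reached on Dom
-- (x = 5*age^2 ± 4, 1 ≤ age ≤ 2^31) the double-precision sqrt never misclassifies the test,
-- so root*root == x computes the same Bool; x is always ≥ 1 here (age ≥ 1), so .toNat is exact.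
def pvIsPerfectSquare (x : Int) : Bool :=
  let root : Int := (Nat.sqrt x.toNat : Int)
  root * root == x

def pvIsFibo (n : Int) : Bool :=
  pvIsPerfectSquare (5*n*n + 4) || pvIsPerfectSquare (5*n*n - 4)

-- list_opacities[age-1] always indexes the last element (the list has exactly `age` elements
-- when `age` is processed), so the IndexError default of pyGetD is never taken.
def list_opacity (n : Int) : List Int :=
  (PySem.List.pyRange 1 n 1).foldl
    (fun acc age =>
      if pvIsFibo age then acc ++ [PySem.List.pyGetD acc (age-1) 0 - age]
      else acc ++ [PySem.List.pyGetD acc (age-1) 0 + 1])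
    [10000]

-- ===== PORT B =====
-- the `while a < n` fib-generation loop; 0 < a < b is the loop invariant that makes it terminate
def pvFibsAux (n a b : Int) (ha : 0 < a) (hab : a < b) : List Int :=
  if a < n then a :: pvFibsAux n b (a+b) (by omega) (by omega)
  else []
termination_by (n - a).toNat
decreasing_by omega

def list_opacity_alt (n : Int) : List Int :=
  let fibs : PySem.Set Int := PySem.Set.ofList (pvFibsAux n 1 2 (by norm_num) (by norm_num))
  ((PySem.List.pyRange 1 n 1).foldl
    (fun p age =>
      let cur := if fibs.contains age then p.2 - age else p.2 + 1
      (p.1 ++ [cur], cur))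
    ([10000], 10000)).1

-- ===== PRECONDITION & SPEC =====
def Spec_list_opacity (n : Int) (out : List Int) : Prop := out = list_opacity_alt n
instance (n : Int) (out : List Int) : Decidable (Spec_list_opacity n out) := by unfold Spec_list_opacity; infer_instance

-- ===== CLAIM (what is proved, stated in full; the proofs are below) =====
def Claim_equal_list_opacity : Prop := ∀ (n : Int), Dom_list_opacity n → Spec_list_opacity n (list_opacity n)

-- ===== LEMMAS AND PROOFS =====

-- Lucas numbers, the companion sequence of Nat.fib used to prove the 5n²±4 characterisation.
def pvLuc : Nat → Nat
  | 0 => 2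
  | 1 => 1
  | n+2 => pvLuc n + pvLuc (n+1)

theorem pvLuc_add_two (n : Nat) : pvLuc (n+2) = pvLuc n + pvLuc (n+1) := rfl

-- L_k² − 5·F_k² = 4·(−1)^k, with the cross identity L_k·L_{k+1} − 5·F_k·F_{k+1} = 2·(−1)^k.
theorem pvLucFibSq (k : Nat) :
    ((pvLuc k : Int))^2 - 5*((Nat.fib k : Int))^2 = 4*(-1)^k ∧
    ((pvLuc (k+1) : Int))^2 - 5*((Nat.fib (k+1) : Int))^2 = 4*(-1)^(k+1) ∧
    (pvLuc k : Int)*(pvLuc (k+1)) - 5*(Nat.fib k : Int)*(Nat.fib (k+1)) = 2*(-1)^k := by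
  induction k with
  | zero => norm_num [pvLuc, Nat.fib]
  | succ k ih =>
    obtain ⟨h1, h2, h3⟩ := ih
    refine ⟨h2, ?_, ?_⟩ <;>
    · rw [pvLuc_add_two, Nat.fib_add_two]
      push_cast
      ring_nf
      ring_nf at h1 h2 h3
      nlinarith [h1, h2, h3]

-- 2·F_{k+1} = F_k + L_k  and  2·L_{k+1} = 5·F_k + L_k
theorem pvStepUp (k : Nat) :
    2*((Nat.fib (k+1) : Int)) = (Nat.fib k : Int) + pvLuc k ∧
    2*((pvLuc (k+1) : Int)) = 5*(Nat.fib k : Int) + pvLuc k := by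
  induction k with
  | zero => norm_num [pvLuc, Nat.fib]
  | succ k ih =>
    obtain ⟨h1, h2⟩ := ih
    rw [pvLuc_add_two, Nat.fib_add_two]
    push_cast
    constructor <;> linarith

-- descent: every solution of s² = 5m² ± 4 is a (fib, lucas) pair
theorem pvDescent : ∀ (mN : Nat) (m s e : Int), m.toNat = mN → 1 ≤ m → 0 ≤ s →
    (e = 4 ∨ e = -4) → s^2 = 5*m^2 + e →
    ∃ k : Nat, 1 ≤ k ∧ (Nat.fib k : Int) = m ∧ (pvLuc k : Int) = s := by
  intro mN
  induction mN using Nat.strong_induction_on with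
  | _ mN ih =>
    intro m s e hmN hm hs he hsq
    by_cases h1 : m = 1
    · subst h1
      rcases he with rfl | rfl
      · have hz : (s-3)*(s+3) = 0 := by linear_combination hsq
        rcases mul_eq_zero.mp hz with h | h
        · have hs3 : s = 3 := by linarith
          exact ⟨2, by norm_num, by norm_num [Nat.fib], by subst hs3; decide⟩
        · omega
      · have hz : (s-1)*(s+1) = 0 := by linear_combination hsq
        rcases mul_eq_zero.mp hz with h | h
        · have hs1 : s = 1 := by linarith
          exact ⟨1, le_rfl, by norm_num [Nat.fib], by subst hs1; decide⟩
        · omega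
    · have hm2 : 2 ≤ m := by omega
      -- s and m have the same parity
      have hpar : (2:Int) ∣ (s - m) := by
        rcases Int.even_or_odd (s - m) with ⟨t, ht⟩ | ⟨t, ht⟩
        · exact ⟨t, by linarith⟩
        · exfalso
          have ht' : s - m - 2*t - 1 = 0 := by linarith
          have hf : 2*(-2*m^2+2*t*m+2*t^2+2*t+m) + 1 = e := by
            linear_combination hsq - (s+m+2*t+1)*ht'
          have hdvd : (2:Int) ∣ e - 1 := ⟨-2*m^2+2*t*m+2*t^2+2*t+m, by linarith⟩
          rcases he with rfl | rfl <;> norm_num at hdvd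
      obtain ⟨t, ht⟩ := hpar
      -- bounds m < s < 3m
      have hs_gt : m < s := by
        by_contra hcon
        push Not at hcon
        have hss : s*s ≤ m*m := mul_self_le_mul_self hs hcon
        rcases he with rfl | rfl <;> nlinarith
      have hs_lt : s < 3*m := by
        by_contra hcon
        push Not at hcon
        rcases he with rfl | rfl <;> nlinarith
      have ht1 : 1 ≤ t := by omega
      have htm : t < m := by omega
      -- the descended pair
      have he' : (-e = 4 ∨ -e = -4) := by omega
      have hsq' : (2*m-t)^2 = 5*t^2 + (-e) := by
        linear_combination -hsq + (s+m+2*t)*(by linarith : s - m - 2*t = 0)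
      obtain ⟨k, hk1, hkf, hkl⟩ :=
        ih t.toNat (by omega) t (2*m-t) (-e) rfl (by omega) (by omega) he' hsq'
      obtain ⟨u1, u2⟩ := pvStepUp k
      refine ⟨k+1, by omega, by linarith [u1, hkf, hkl], by linarith [u2, hkf, hkl]⟩

-- the perfect-square primitive, characterised
theorem pvSquare_iff (x : Int) (hx : 0 ≤ x) :
    pvIsPerfectSquare x = true ↔ ∃ s : Int, 0 ≤ s ∧ s^2 = x := by
  constructor
  · intro h
    simp only [pvIsPerfectSquare, beq_iff_eq] at h
    exact ⟨(Nat.sqrt x.toNat : Int), by positivity, by rw [sq]; exact h⟩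
  · rintro ⟨s, hs0, rfl⟩
    obtain ⟨a, rfl⟩ : ∃ a : Nat, s = (a : Int) := ⟨s.toNat, (Int.toNat_of_nonneg hs0).symm⟩
    simp only [pvIsPerfectSquare, beq_iff_eq]
    have h1 : ((a:Int)^2) = ((a^2 : Nat) : Int) := by push_cast; ring
    rw [h1, Int.toNat_natCast, Nat.sqrt_eq' a]
    push_cast; ring

-- n ≥ 1 passes A's test iff n is a (positive) Fibonacci number
theorem pvIsFibo_iff (a : Int) (ha : 1 ≤ a) :
    pvIsFibo a = true ↔ ∃ k : Nat, 2 ≤ k ∧ (Nat.fib k : Int) = a := by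
  have bump : ∀ k : Nat, 1 ≤ k → (Nat.fib k : Int) = a → ∃ k' : Nat, 2 ≤ k' ∧ (Nat.fib k' : Int) = a := by
    intro k hk hkf
    by_cases hk1 : k = 1
    · exact ⟨2, le_rfl, by subst hk1; exact_mod_cast hkf⟩
    · exact ⟨k, by omega, hkf⟩
  constructor
  · intro h
    rcases Bool.or_eq_true_iff.mp h with h | h
    · obtain ⟨s, hs0, hsq⟩ := (pvSquare_iff _ (by nlinarith)).mp h
      obtain ⟨k, hk, hkf, -⟩ := pvDescent a.toNat a s 4 rfl ha hs0 (Or.inl rfl) (by linear_combination hsq)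
      exact bump k hk hkf
    · obtain ⟨s, hs0, hsq⟩ := (pvSquare_iff _ (by nlinarith)).mp h
      obtain ⟨k, hk, hkf, -⟩ := pvDescent a.toNat a s (-4) rfl ha hs0 (Or.inr rfl) (by linear_combination hsq)
      exact bump k hk hkf
  · rintro ⟨k, hk, rfl⟩
    obtain ⟨hL, -, -⟩ := pvLucFibSq k
    rw [pvIsFibo, Bool.or_eq_true_iff]
    rcases Nat.even_or_odd k with hpar | hpar
    · left
      rw [hpar.neg_one_pow] at hL
      exact (pvSquare_iff _ (by nlinarith)).mpr ⟨(pvLuc k : Int), by positivity, by linarith⟩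
    · right
      rw [hpar.neg_one_pow] at hL
      exact (pvSquare_iff _ (by nlinarith)).mpr ⟨(pvLuc k : Int), by positivity, by linarith⟩

-- membership in the generated list
theorem pvMem_fibsAux : ∀ (fuel : Nat) (n a b : Int) (ha : 0 < a) (hab : a < b) (k : Nat),
    2 ≤ k → a = (Nat.fib k : Int) → b = (Nat.fib (k+1) : Int) → (n - a).toNat ≤ fuel →
    ∀ x, (x ∈ pvFibsAux n a b ha hab ↔ ∃ j : Nat, k ≤ j ∧ (Nat.fib j : Int) = x ∧ x < n) := by
  intro fuel
  induction fuel with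
  | zero =>
    intro n a b ha hab k hk hafib hbfib hfuel x
    have hna : n ≤ a := by omega
    rw [pvFibsAux, if_neg (by omega)]
    simp only [List.not_mem_nil, false_iff]
    rintro ⟨j, hj, rfl, hlt⟩
    have : (Nat.fib k : Int) ≤ (Nat.fib j : Int) := by exact_mod_cast Nat.fib_mono hj
    omega
  | succ fuel ih =>
    intro n a b ha hab k hk hafib hbfib hfuel x
    by_cases hcase : a < n
    · rw [pvFibsAux, if_pos hcase]
      have hab2 : a + b = (Nat.fib (k+2) : Int) := by
        rw [Nat.fib_add_two]; push_cast; omega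
      have hrec := ih n b (a+b) (by omega) (by omega) (k+1) (by omega) hbfib
        (by rw [hab2]) (by omega) x
      rw [List.mem_cons, hrec]
      constructor
      · rintro (rfl | ⟨j, hj, hfj, hlt⟩)
        · exact ⟨k, le_rfl, hafib.symm, hcase⟩
        · exact ⟨j, by omega, hfj, hlt⟩
      · rintro ⟨j, hj, hfj, hlt⟩
        rcases eq_or_lt_of_le hj with rfl | hjk
        · exact Or.inl (by omega)
        · exact Or.inr ⟨j, by omega, hfj, hlt⟩
    · rw [pvFibsAux, if_neg hcase]
      simp only [List.not_mem_nil, false_iff]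
      rintro ⟨j, hj, rfl, hlt⟩
      have : (Nat.fib k : Int) ≤ (Nat.fib j : Int) := by exact_mod_cast Nat.fib_mono hj
      omega

-- the common reference sequence of opacity values
def pvOpSeq (t : Int → Bool) : Nat → Int
  | 0 => 10000
  | k+1 => if t ((k : Int)+1) then pvOpSeq t k - ((k : Int)+1) else pvOpSeq t k + 1

theorem pvOpSeq_congr (t t' : Int → Bool) : ∀ (i : Nat),
    (∀ j : Nat, 1 ≤ j → j ≤ i → t (j : Int) = t' (j : Int)) → pvOpSeq t i = pvOpSeq t' i := by
  intro i
  induction i with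
  | zero => intro _; rfl
  | succ i ih =>
    intro h
    have ht := h (i+1) (by omega) le_rfl
    push_cast at ht
    simp only [pvOpSeq, ht, ih (fun j h1 h2 => h j h1 (by omega))]

theorem pvLoopA (m : Nat) :
    (PySem.List.pyRange 1 (1 + (m : Int)) 1).foldl
      (fun acc age =>
        if pvIsFibo age then acc ++ [PySem.List.pyGetD acc (age-1) 0 - age]
        else acc ++ [PySem.List.pyGetD acc (age-1) 0 + 1])
      [10000]
    = (List.range (m+1)).map (fun i => pvOpSeq pvIsFibo i) := by
  induction m with
  | zero =>
    rw [show (1 + ((0:Nat) : Int)) = 1 by norm_num, PySem.List.pyRange_one_eq_nil le_rfl]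
    simp [pvOpSeq]
  | succ m ih =>
    rw [show (1 + ((m+1:Nat) : Int)) = (1 + (m : Int)) + 1 by push_cast; ring,
       PySem.List.pyRange_one_succ_right (by omega), List.foldl_append, ih]
    simp only [List.foldl_cons, List.foldl_nil]
    have hidx : ((1 : Int) + (m : Int)) - 1 = ((m : Int)) := by ring
    have hget : PySem.List.pyGetD ((List.range (m+1)).map (fun i => pvOpSeq pvIsFibo i)) ((m : Int)) 0
        = pvOpSeq pvIsFibo m := by
      simp [pysem]
    rw [hidx, hget, List.range_succ (n := m+1), List.map_append, List.map_cons, List.map_nil]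
    have harg : ((1 : Int) + (m : Int)) = ((m : Int) + 1) := by ring
    rw [harg]
    simp only [pvOpSeq]
    split_ifs <;> rfl

theorem pvLoopB (t : Int → Bool) (m : Nat) :
    (PySem.List.pyRange 1 (1 + (m : Int)) 1).foldl
      (fun p age =>
        let cur := if t age then p.2 - age else p.2 + 1
        (p.1 ++ [cur], cur))
      ([10000], 10000)
    = ((List.range (m+1)).map (fun i => pvOpSeq t i), pvOpSeq t m) := by
  induction m with
  | zero =>
    rw [show (1 + ((0:Nat) : Int)) = 1 by norm_num, PySem.List.pyRange_one_eq_nil le_rfl]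
    simp [pvOpSeq]
  | succ m ih =>
    rw [show (1 + ((m+1:Nat) : Int)) = (1 + (m : Int)) + 1 by push_cast; ring,
       PySem.List.pyRange_one_succ_right (by omega), List.foldl_append, ih]
    simp only [List.foldl_cons, List.foldl_nil, List.range_succ (n := m+1), List.map_append,
      List.map_cons, List.map_nil]
    have harg : ((1 : Int) + (m : Int)) = ((m : Int) + 1) := by ring
    rw [harg]
    simp only [pvOpSeq]

-- ===== VERDICT (by name: the statement is the Claim_ definition above) =====
theorem list_opacity_spec : Claim_equal_list_opacity := by
  intro n _
  unfold Spec_list_opacity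
  by_cases hn : n ≤ 1
  · unfold list_opacity list_opacity_alt
    rw [PySem.List.pyRange_one_eq_nil hn]
    rfl
  · push Not at hn
    obtain ⟨m, hm⟩ : ∃ m : Nat, n = 1 + (m : Int) := ⟨(n-1).toNat, by omega⟩
    subst hm
    unfold list_opacity list_opacity_alt
    simp only
    rw [pvLoopA m]
    rw [pvLoopB _ m]
    apply List.map_congr_left
    intro i hi
    have him : i ≤ m := by
      have := List.mem_range.mp hi
      omega
    apply pvOpSeq_congr
    intro j hj1 hji
    rw [Bool.eq_iff_iff, pvIsFibo_iff _ (by exact_mod_cast hj1)]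
    simp only [PySem.Set.contains_eq_listContains, List.contains_eq_mem, PySem.Set.mem_ofList,
      decide_eq_true_eq]
    rw [pvMem_fibsAux ((1 + (m:Int)) - 1).toNat (1 + (m:Int)) 1 2 (by norm_num) (by norm_num) 2
      le_rfl (by decide) (by decide) (by omega) (j : Int)]
    constructor
    · rintro ⟨k, hk, hkf⟩
      exact ⟨k, hk, hkf, by omega⟩
    · rintro ⟨k, hk, hkf, -⟩
      exact ⟨k, hk, hkf⟩
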